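-- pv_equiv track=rewrite | github.com/6MicheleStingo9/xch-MIND | src/workflow/conditions.py | _get_completed_analysis_types
-- ===== SOURCE A (Python) =====
-- def _get_completed_analysis_types(messages: list) -> set:
--     """Extract which analysis types have been completed from messages."""
--     completed = set()
--
--     for msg in messages:
--         if isinstance(msg, str):
--             if "GeoAnalyzer" in msg:
--                 completed.add("geo")
--             elif "TemporalAnalyzer" in msg:
--                 completed.add("temporal")
--             elif "TypeAnalyzer" in msg:
--                 completed.add("type")
--             elif "PathGenerator" in msg:
--                 completed.add("path")
--
--     return completed
-- ===== SOURCE B (Python) =====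
-- _TABLE = (
--     ("GeoAnalyzer", "geo"),
--     ("TemporalAnalyzer", "temporal"),
--     ("TypeAnalyzer", "type"),
--     ("PathGenerator", "path"),
-- )
--
--
-- def _classify(msg, table=_TABLE):
--     """First matching label for msg, recursing down the priority table."""
--     if not isinstance(msg, str) or not table:
--         return None
--     needle, label = table[0]
--     if needle in msg:
--         return label
--     return _classify(msg, table[1:])
--
--
-- def _get_completed_analysis_types(messages: list) -> set:
--     """Extract which analysis types have been completed from messages."""
--     return {label for label in map(_classify, messages) if label is not None}
-- ===== Notes on version B (the rewrite author's own statement) =====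
-- stated objective: idiomatic
-- what changed: A's single loop with an if/elif chain mutating a set is replaced by a staged pipeline: a recursive table-driven classifier maps each message to an optional label, and a set comprehension over that label stream builds the result in one dedup step.
import Mathlib
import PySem

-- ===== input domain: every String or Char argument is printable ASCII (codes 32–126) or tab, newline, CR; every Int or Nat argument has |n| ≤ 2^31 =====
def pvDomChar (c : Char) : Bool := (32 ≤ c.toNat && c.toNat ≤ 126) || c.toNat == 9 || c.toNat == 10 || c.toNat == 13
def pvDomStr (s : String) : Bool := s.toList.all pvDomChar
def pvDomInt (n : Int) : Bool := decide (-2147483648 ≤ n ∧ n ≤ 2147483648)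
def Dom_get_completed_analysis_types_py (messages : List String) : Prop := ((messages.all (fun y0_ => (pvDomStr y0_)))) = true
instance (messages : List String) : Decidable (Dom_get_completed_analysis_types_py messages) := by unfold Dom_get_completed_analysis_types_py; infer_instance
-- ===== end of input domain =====

-- B replaces A's single loop with an if/elif chain mutating a set by a staged pipeline:
-- a recursive table-driven classifier per message, then one dedup step over the label stream (idiomatic; same cost).
-- ===== PORT A =====
def get_completed_analysis_types_py (messages : List String) : List String :=
  messages.foldl (fun completed msg =>
    if PySem.Str.isIn "GeoAnalyzer" msg then PySem.Set.add completed "geo"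
    else if PySem.Str.isIn "TemporalAnalyzer" msg then PySem.Set.add completed "temporal"
    else if PySem.Str.isIn "TypeAnalyzer" msg then PySem.Set.add completed "type"
    else if PySem.Str.isIn "PathGenerator" msg then PySem.Set.add completed "path"
    else completed) []

-- ===== PORT B =====
def pvTable : List (String × String) :=
  [("GeoAnalyzer", "geo"), ("TemporalAnalyzer", "temporal"),
   ("TypeAnalyzer", "type"), ("PathGenerator", "path")]

def pvClassify (msg : String) : List (String × String) → Option String
  | [] => none
  | (needle, label) :: rest =>
      if PySem.Str.isIn needle msg then some label else pvClassify msg rest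

def get_completed_analysis_types_py_alt (messages : List String) : List String :=
  PySem.Set.ofList ((messages.map (fun m => pvClassify m pvTable)).filterMap id)

-- ===== PRECONDITION & SPEC =====
def Spec_get_completed_analysis_types_py (messages : List String) (out : List String) : Prop := out = get_completed_analysis_types_py_alt messages
instance (messages : List String) (out : List String) : Decidable (Spec_get_completed_analysis_types_py messages out) := by unfold Spec_get_completed_analysis_types_py; infer_instance

-- ===== CLAIM (what is proved, stated in full; the proofs are below) =====
def Claim_equal_get_completed_analysis_types_py : Prop := ∀ (messages : List String), Dom_get_completed_analysis_types_py messages → Spec_get_completed_analysis_types_py messages (get_completed_analysis_types_py messages)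

-- ===== LEMMAS AND PROOFS =====

-- A's if/elif step on one message equals the classify-then-maybe-add step
theorem pv_step_eq (completed : List String) (msg : String) :
    (if PySem.Str.isIn "GeoAnalyzer" msg then PySem.Set.add completed "geo"
     else if PySem.Str.isIn "TemporalAnalyzer" msg then PySem.Set.add completed "temporal"
     else if PySem.Str.isIn "TypeAnalyzer" msg then PySem.Set.add completed "type"
     else if PySem.Str.isIn "PathGenerator" msg then PySem.Set.add completed "path"
     else completed) =
    (match pvClassify msg pvTable with
     | some l => PySem.Set.add completed l
     | none => completed) := by
  simp only [pvTable, pvClassify]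
  split_ifs <;> rfl

-- folding the classify step from any accumulator equals folding Set.add over the classified labels
theorem pv_fold_match (messages : List String) (acc : List String) :
    messages.foldl (fun completed msg =>
      match pvClassify msg pvTable with
      | some l => PySem.Set.add completed l
      | none => completed) acc
    = (messages.filterMap (fun m => pvClassify m pvTable)).foldl PySem.Set.add acc := by
  induction messages generalizing acc with
  | nil => rfl
  | cons m rest ih =>
      cases h : pvClassify m pvTable <;>
        simp [List.filterMap_cons, h, ih]

-- ===== VERDICT (by name: the statement is the Claim_ definition above) =====
theorem get_completed_analysis_types_py_spec : Claim_equal_get_completed_analysis_types_py := by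
  intro messages _
  show get_completed_analysis_types_py messages = get_completed_analysis_types_py_alt messages
  unfold get_completed_analysis_types_py get_completed_analysis_types_py_alt
  rw [PySem.Set.ofList_eq_foldl, List.filterMap_map]
  have hstep : (fun (completed : List String) (msg : String) =>
      if PySem.Str.isIn "GeoAnalyzer" msg then PySem.Set.add completed "geo"
      else if PySem.Str.isIn "TemporalAnalyzer" msg then PySem.Set.add completed "temporal"
      else if PySem.Str.isIn "TypeAnalyzer" msg then PySem.Set.add completed "type"
      else if PySem.Str.isIn "PathGenerator" msg then PySem.Set.add completed "path"
      else completed)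
      = (fun completed msg =>
          match pvClassify msg pvTable with
          | some l => PySem.Set.add completed l
          | none => completed) :=
    funext fun c => funext fun m => pv_step_eq c m
  rw [hstep]
  simpa using pv_fold_match messages []
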